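-- pv_equiv track=rewrite | github.com/Cauchy1412/O2E-TU-1 | code/Backend/backend/core/models/interpretation.py | _safe_content
-- ===== SOURCE A (Python) =====
-- def _safe_content(content: str):
--     ret = content
--     poisons = ['Alert', 'alert', 'Script', 'script', 'Onerror', 'onerror']
--     for _poison in poisons:
--         ret = ret.replace(_poison, ' ')
--     ERRORMESSAGE = 'The content contains MALICIOUS tokens! Thus NOT displayed.'
--     if ret != content:
--         return ERRORMESSAGE
--     return ret
-- ===== SOURCE B (Python) =====
-- def _safe_content(content: str):
--     if any(p in content for p in ('Alert', 'alert', 'Script', 'script', 'Onerror', 'onerror')):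
--         return 'The content contains MALICIOUS tokens! Thus NOT displayed.'
--     return content
-- ===== Notes on version B (the rewrite author's own statement) =====
-- stated objective: simpler
-- what changed: B is pure detection: it never builds the replaced string, just checks whether any poison token occurs as a substring (replacing a multi-char token with one space always changes the string, and inserting spaces can never create a new poison), returning the error message or the original content.
import Mathlib
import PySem

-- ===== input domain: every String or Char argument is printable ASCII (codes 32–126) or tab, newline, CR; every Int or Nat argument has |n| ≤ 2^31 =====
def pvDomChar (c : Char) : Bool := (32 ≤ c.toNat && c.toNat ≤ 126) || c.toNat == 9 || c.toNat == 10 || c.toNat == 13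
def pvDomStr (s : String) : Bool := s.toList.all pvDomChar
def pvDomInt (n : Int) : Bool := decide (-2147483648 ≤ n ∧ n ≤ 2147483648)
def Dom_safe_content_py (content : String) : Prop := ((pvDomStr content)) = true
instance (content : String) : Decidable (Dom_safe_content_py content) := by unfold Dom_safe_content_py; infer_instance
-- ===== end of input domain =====

-- B replaces A's transform-and-compare with pure detection (no replaced string is ever built); objective: simpler.

-- ===== PORT A =====
def safe_content_py (content : String) : String :=
  let ret := content
  let poisons : List String := ["Alert", "alert", "Script", "script", "Onerror", "onerror"]
  let ret := poisons.foldl (fun r p => PySem.Str.replace r p " ") ret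
  let ERRORMESSAGE := "The content contains MALICIOUS tokens! Thus NOT displayed."
  if ret != content then ERRORMESSAGE else ret

-- ===== PORT B =====
def safe_content_py_alt (content : String) : String :=
  if (["Alert", "alert", "Script", "script", "Onerror", "onerror"] : List String).any
       (fun p => PySem.Str.isIn p content) then
    "The content contains MALICIOUS tokens! Thus NOT displayed."
  else
    content

-- ===== PRECONDITION & SPEC =====
def Spec_safe_content_py (content : String) (out : String) : Prop := out = safe_content_py_alt content
instance (content : String) (out : String) : Decidable (Spec_safe_content_py content out) := by unfold Spec_safe_content_py; infer_instance

-- ===== CLAIM (what is proved, stated in full; the proofs are below) =====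
def Claim_equal_safe_content_py : Prop := ∀ (content : String), Dom_safe_content_py content → Spec_safe_content_py content (safe_content_py content)

-- ===== LEMMAS AND PROOFS =====

-- replace.go never enlarges the string when the replacement is no longer than the pattern
theorem pv_go_len_le (old new : List Char) (hn : new.length ≤ old.length) :
    ∀ (fuel : Nat) (l acc : List Char),
      (PySem.Chars.replace.go old new fuel l acc).length ≤ acc.length + l.length := by
  intro fuel
  induction fuel with
  | zero => intro l acc; simp [PySem.Chars.replace.go]
  | succ n ih =>
    intro l acc
    cases l with
    | nil => simp [PySem.Chars.replace.go]
    | cons c t =>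
      by_cases hp : old.isPrefixOf (c::t)
      · have hpre : old <+: (c::t) := List.isPrefixOf_iff_prefix.mp hp
        have hle : old.length ≤ (c::t).length := hpre.length_le
        simp only [PySem.Chars.replace.go, hp, if_true]
        refine le_trans (ih _ _) ?_
        simp [List.length_drop]
        simp at hle
        omega
      · simp only [PySem.Chars.replace.go, hp]
        refine le_trans (ih _ _) ?_
        simp
        omega

-- replace.go strictly shrinks the string when the pattern occurs and the replacement is shorter
theorem pv_go_len_lt (old new : List Char) (hn : new.length < old.length) :
    ∀ (fuel : Nat) (l acc : List Char), old <:+: l → l.length ≤ fuel →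
      (PySem.Chars.replace.go old new fuel l acc).length < acc.length + l.length := by
  intro fuel
  induction fuel with
  | zero =>
    intro l acc hinf hlen
    have hl : l = [] := by cases l <;> simp_all
    subst hl
    have : old = [] := List.eq_nil_of_infix_nil hinf
    subst this; simp at hn
  | succ n ih =>
    intro l acc hinf hlen
    cases l with
    | nil =>
      have : old = [] := List.eq_nil_of_infix_nil hinf
      subst this; simp at hn
    | cons c t =>
      by_cases hp : old.isPrefixOf (c::t)
      · have hpre : old <+: (c::t) := List.isPrefixOf_iff_prefix.mp hp
        have hle : old.length ≤ (c::t).length := hpre.length_le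
        simp only [PySem.Chars.replace.go, hp, if_true]
        refine lt_of_le_of_lt (pv_go_len_le old new (le_of_lt hn) _ _ _) ?_
        simp [List.length_drop]
        simp at hle
        omega
      · have hnp : ¬ old <+: (c::t) := fun h => hp (List.isPrefixOf_iff_prefix.mpr h)
        have ht : old <:+: t := by
          rcases List.infix_cons_iff.mp hinf with h | h
          · exact absurd h hnp
          · exact h
        simp only [PySem.Chars.replace.go, hp]
        refine lt_of_lt_of_le (ih t (c::acc) ht (by simp at hlen; omega)) ?_
        simp
        omega

-- replace.go is the identity when the pattern does not occur
theorem pv_go_id (old new : List Char) :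
    ∀ (fuel : Nat) (l acc : List Char), ¬ old <:+: l →
      PySem.Chars.replace.go old new fuel l acc = acc.reverse ++ l := by
  intro fuel
  induction fuel with
  | zero => intro l acc _; simp [PySem.Chars.replace.go]
  | succ n ih =>
    intro l acc hinf
    cases l with
    | nil => simp [PySem.Chars.replace.go]
    | cons c t =>
      have hp : ¬ old.isPrefixOf (c::t) := fun h =>
        hinf ((List.isPrefixOf_iff_prefix.mp h).isInfix)
      have ht : ¬ old <:+: t := fun h => hinf (h.trans (List.suffix_cons c t).isInfix)
      simp only [PySem.Chars.replace.go, hp, ih t (c::acc) ht]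
      simp

theorem pv_replace_id (s old new : List Char) (h0 : old ≠ []) (h : ¬ old <:+: s) :
    PySem.Chars.replace s old new = s := by
  simp only [PySem.Chars.replace, List.isEmpty_iff]
  rw [if_neg h0, pv_go_id old new s.length s [] h]
  simp

theorem pv_replace_len_le (s old new : List Char) (h0 : old ≠ []) (hn : new.length ≤ old.length) :
    (PySem.Chars.replace s old new).length ≤ s.length := by
  simp only [PySem.Chars.replace, List.isEmpty_iff]
  rw [if_neg h0]
  simpa using pv_go_len_le old new hn s.length s []

theorem pv_replace_len_lt (s old new : List Char) (hn : new.length < old.length)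
    (h : old <:+: s) : (PySem.Chars.replace s old new).length < s.length := by
  have h0 : old ≠ [] := by intro he; subst he; simp at hn
  simp only [PySem.Chars.replace, List.isEmpty_iff]
  rw [if_neg h0]
  simpa using pv_go_len_lt old new hn s.length s [] h le_rfl

-- A's fold over the poison list, on the character-list side
def pvFoldRep (s : List Char) (ps : List (List Char)) : List Char :=
  ps.foldl (fun r p => PySem.Chars.replace r p [' ']) s

theorem pv_fold_len_le (ps : List (List Char)) (hps : ∀ p ∈ ps, 1 ≤ p.length) :
    ∀ s : List Char, (pvFoldRep s ps).length ≤ s.length := by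
  induction ps with
  | nil => intro s; simp [pvFoldRep]
  | cons p rest ih =>
    intro s
    have hp := hps p (by simp)
    have h0 : p ≠ [] := by intro he; subst he; simp at hp
    refine le_trans (ih (fun q hq => hps q (by simp [hq])) _) ?_
    exact pv_replace_len_le s p [' '] h0 (by simpa using hp)

theorem pv_fold_id (ps : List (List Char)) (s : List Char)
    (h : ∀ p ∈ ps, p ≠ [] ∧ ¬ p <:+: s) : pvFoldRep s ps = s := by
  induction ps with
  | nil => simp [pvFoldRep]
  | cons p rest ih =>
    obtain ⟨h0, hni⟩ := h p (by simp)
    simp only [pvFoldRep, List.foldl_cons, pv_replace_id s p [' '] h0 hni]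
    exact ih (fun q hq => h q (by simp [hq]))

theorem pv_fold_len_lt (ps : List (List Char)) (s : List Char)
    (hps : ∀ p ∈ ps, 2 ≤ p.length) (h : ∃ p ∈ ps, p <:+: s) :
    (pvFoldRep s ps).length < s.length := by
  induction ps with
  | nil => simp at h
  | cons p rest ih =>
    have hrest1 : ∀ q ∈ rest, 1 ≤ q.length := fun q hq => le_trans (by omega) (hps q (by simp [hq]))
    by_cases hp : p <:+: s
    · have hlt := pv_replace_len_lt s p [' '] (by simpa using hps p (by simp)) hp
      simp only [pvFoldRep, List.foldl_cons]
      exact lt_of_le_of_lt (pv_fold_len_le rest hrest1 _) hlt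
    · have h0 : p ≠ [] := by
        intro he; subst he; have := hps [] (by simp); simp at this
      simp only [pvFoldRep, List.foldl_cons, pv_replace_id s p [' '] h0 hp]
      refine ih (fun q hq => hps q (by simp [hq])) ?_
      rcases h with ⟨q, hq, hinf⟩
      rcases List.mem_cons.mp hq with rfl | hq'
      · exact absurd hinf hp
      · exact ⟨q, hq', hinf⟩

-- A's string fold equals the list-side fold
theorem pv_foldA (content : String) :
    ((["Alert", "alert", "Script", "script", "Onerror", "onerror"] : List String).foldl
        (fun r p => PySem.Str.replace r p " ") content).toList =
      pvFoldRep content.toList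
        ["Alert".toList, "alert".toList, "Script".toList, "script".toList,
         "Onerror".toList, "onerror".toList] := by
  simp [pvFoldRep, List.foldl_cons, List.foldl_nil, PySem.Str.replace]

-- ===== VERDICT (by name: the statement is the Claim_ definition above) =====
theorem safe_content_py_spec : Claim_equal_safe_content_py := by
  intro content _
  unfold Spec_safe_content_py safe_content_py safe_content_py_alt
  simp only []
  by_cases hany : (["Alert", "alert", "Script", "script", "Onerror", "onerror"] : List String).any
      (fun p => PySem.Str.isIn p content) = true
  · -- some poison occurs: A's fold strictly shrinks, so ret ≠ content and A returns the error
    have hex : ∃ p ∈ (["Alert".toList, "alert".toList, "Script".toList, "script".toList,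
        "Onerror".toList, "onerror".toList] : List (List Char)), p <:+: content.toList := by
      rcases List.any_eq_true.mp hany with ⟨q, hq, hin⟩
      have hinf := (PySem.Str.isIn_iff_infix q content).mp hin
      fin_cases hq <;> exact ⟨_, by simp, hinf⟩
    have hlt := pv_fold_len_lt _ content.toList (by decide) hex
    have hne : (["Alert", "alert", "Script", "script", "Onerror", "onerror"] : List String).foldl
        (fun r p => PySem.Str.replace r p " ") content ≠ content := by
      intro he
      have h2 := congrArg String.toList he
      rw [pv_foldA] at h2
      rw [h2] at hlt
      omega
    rw [if_pos (bne_iff_ne.mpr hne), if_pos hany]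
  · -- no poison occurs: every replace is the identity, A returns ret = content
    have hid : ∀ p ∈ (["Alert".toList, "alert".toList, "Script".toList, "script".toList,
        "Onerror".toList, "onerror".toList] : List (List Char)), p ≠ [] ∧ ¬ p <:+: content.toList := by
      have hnin : ∀ q ∈ (["Alert", "alert", "Script", "script", "Onerror", "onerror"] : List String),
          PySem.Str.isIn q content = false := by
        intro q hq
        by_contra hh
        exact hany (List.any_eq_true.mpr ⟨q, hq, by simpa using hh⟩)
      intro p hp
      fin_cases hp
      · exact ⟨by decide, fun h => hany (List.any_eq_true.mpr
          ⟨"Alert", by simp, (PySem.Str.isIn_iff_infix "Alert" content).mpr h⟩)⟩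
      · exact ⟨by decide, fun h => hany (List.any_eq_true.mpr
          ⟨"alert", by simp, (PySem.Str.isIn_iff_infix "alert" content).mpr h⟩)⟩
      · exact ⟨by decide, fun h => hany (List.any_eq_true.mpr
          ⟨"Script", by simp, (PySem.Str.isIn_iff_infix "Script" content).mpr h⟩)⟩
      · exact ⟨by decide, fun h => hany (List.any_eq_true.mpr
          ⟨"script", by simp, (PySem.Str.isIn_iff_infix "script" content).mpr h⟩)⟩
      · exact ⟨by decide, fun h => hany (List.any_eq_true.mpr
          ⟨"Onerror", by simp, (PySem.Str.isIn_iff_infix "Onerror" content).mpr h⟩)⟩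
      · exact ⟨by decide, fun h => hany (List.any_eq_true.mpr
          ⟨"onerror", by simp, (PySem.Str.isIn_iff_infix "onerror" content).mpr h⟩)⟩
    have heq : (["Alert", "alert", "Script", "script", "Onerror", "onerror"] : List String).foldl
        (fun r p => PySem.Str.replace r p " ") content = content := by
      apply String.toList_injective
      rw [pv_foldA]
      exact pv_fold_id _ content.toList hid
    rw [if_neg (by simp [heq]), if_neg hany, heq]
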